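-- pv_equiv track=rewrite | github.com/ChakshuGupta13/propositional-logic-theorem-prover-using-resolution-refutation | main.py | remove_extra_parenthesis
-- ===== SOURCE A (Python) =====
-- PROPOSITIONAL_OPERATORS = ['!', '&', '|', '>', '=', '(', ')']
--
-- def is_propositional_op(op):
--     """
--     Returns whether op is propositional operator or not.
--
--     @param op (str)
--     : Operator
--     """
--     return op in PROPOSITIONAL_OPERATORS
--
-- def literal_not_protected(sentence):
--     contain_op = False
--
--     for i in sentence:
--         if is_propositional_op(i):
--             contain_op = True
--             break
--
--     if not contain_op:
--         return False
--
--     off_balance = 0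
--
--     i = 0
--     L = len(sentence)
--
--     while i < L:
--         if sentence[i] == "(":
--             off_balance += 1
--         elif sentence[i] == ")":
--             off_balance -= 1
--         elif off_balance == 0:
--             return True
--
--         i += 1
--
--     return False
--
-- def remove_extra_parenthesis(sentence):
--     processed_sentence = []
--
--     i = 0
--     L = len(sentence)
--     brackets = []
--     content = []
--
--     while i < L:
--         if sentence[i] == "(":
--             content.append(processed_sentence.copy())
--             brackets.append("(")
--
--             processed_sentence.clear()
--         elif sentence[i] == ")":
--             if literal_not_protected(processed_sentence):
--                 processed_sentence.insert(0, "(")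
--                 processed_sentence.append(")")
--
--             processed_sentence = content[len(content) - 1].copy() + processed_sentence
--
--             brackets.pop()
--             content.pop()
--         else:
--             processed_sentence.append(sentence[i])
--
--         i += 1
--
--     return processed_sentence
-- ===== SOURCE B (Python) =====
-- PROPOSITIONAL_OPERATORS = ['!', '&', '|', '>', '=', '(', ')']
--
-- def remove_extra_parenthesis(sentence):
--     # Single stack pass: per level keep (content, has-operator, has-top-level-token)
--     # flags incrementally, instead of rescanning the processed sublist at every ')'.
--     out = []
--     has_op = False
--     top = False
--     stack = []
--     for t in sentence:
--         if t == "(":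
--             stack.append((out, has_op, top))
--             out, has_op, top = [], False, False
--         elif t == ")":
--             child = out
--             wrap = has_op and top
--             out, ph, pt = stack.pop()
--             if wrap:
--                 out.append("(")
--                 out.extend(child)
--                 out.append(")")
--                 has_op, top = True, pt
--             else:
--                 out.extend(child)
--                 has_op, top = ph or has_op, pt or top
--         else:
--             out.append(t)
--             has_op = has_op or t in PROPOSITIONAL_OPERATORS
--             top = True
--     return out
-- ===== Notes on version B (the rewrite author's own statement) =====
-- stated objective: alternative
-- what changed: A re-scans the processed sublist on every ')' (literal_not_protected) and rebuilds levels with copy+concat; B makes one stack pass keeping per-level has-operator / has-top-level-token flags incrementally, trading the rescans for constant extra state per level; Pre_ excludes only inputs with an unmatched ')' on which both A and B raise IndexError.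
import Mathlib
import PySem

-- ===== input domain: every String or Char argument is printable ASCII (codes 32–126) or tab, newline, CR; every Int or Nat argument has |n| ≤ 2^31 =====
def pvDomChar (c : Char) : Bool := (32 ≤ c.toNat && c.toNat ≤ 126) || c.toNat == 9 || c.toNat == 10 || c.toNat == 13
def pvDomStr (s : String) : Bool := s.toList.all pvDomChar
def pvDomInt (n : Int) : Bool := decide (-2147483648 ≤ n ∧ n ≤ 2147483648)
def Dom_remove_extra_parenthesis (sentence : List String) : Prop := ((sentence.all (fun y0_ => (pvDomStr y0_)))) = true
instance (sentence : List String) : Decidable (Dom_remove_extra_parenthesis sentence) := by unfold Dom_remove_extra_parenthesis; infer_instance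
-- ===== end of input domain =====

-- B replaces A's per-')' rescans (literal_not_protected) by one stack pass maintaining
-- per-level has-operator / has-top-level-token flags incrementally (objective: alternative).


-- ===== PORT A =====
def PROPOSITIONAL_OPERATORS : List String := ["!", "&", "|", ">", "=", "(", ")"]

def is_propositional_op (op : String) : Bool := PROPOSITIONAL_OPERATORS.contains op

-- first loop of literal_not_protected (with its break)
def lnp_containOp : List String → Bool
  | [] => false
  | x :: r => if is_propositional_op x then true else lnp_containOp r

-- second (while) loop of literal_not_protected, with its early return
def lnp_loop : Int → List String → Bool
  | _, [] => false
  | ob, x :: r =>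
    if x = "(" then lnp_loop (ob + 1) r
    else if x = ")" then lnp_loop (ob - 1) r
    else if ob = 0 then true
    else lnp_loop ob r

def literal_not_protected (s : List String) : Bool :=
  if lnp_containOp s then lnp_loop 0 s else false

-- the while loop of remove_extra_parenthesis; brackets/content used as stacks (head = Python's last).
-- On ')' with empty content Python raises IndexError (excluded by Pre_); there we just keep going.
def rep_loop : List String → List String → List String → List (List String) → List String
  | [], ps, _, _ => ps
  | x :: rest, ps, brackets, content =>
    if x = "(" then rep_loop rest [] ("(" :: brackets) (ps :: content)
    else if x = ")" then
      let ps' := if literal_not_protected ps then "(" :: ps ++ [")"] else ps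
      match content with
      | c :: cs => rep_loop rest (c ++ ps') (brackets.drop 1) cs
      | [] => rep_loop rest ps' brackets []
    else rep_loop rest (ps ++ [x]) brackets content

def remove_extra_parenthesis (sentence : List String) : List String :=
  rep_loop sentence [] [] []

-- ===== PORT B =====
def opB (t : String) : Bool := (["!", "&", "|", ">", "=", "(", ")"] : List String).contains t

-- B's single for loop; state: out, has_op, top, stack of saved (out, has_op, top).
-- On ')' with empty stack Python B raises IndexError (excluded by Pre_); there we keep going.
def repB_loop : List String → List String → Bool → Bool → List (List String × Bool × Bool) → List String
  | [], out, _, _, _ => out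
  | t :: rest, out, h, tp, stack =>
    if t = "(" then repB_loop rest [] false false ((out, h, tp) :: stack)
    else if t = ")" then
      match stack with
      | (pout, ph, pt) :: st =>
        if h && tp then repB_loop rest (pout ++ "(" :: (out ++ [")"])) true pt st
        else repB_loop rest (pout ++ out) (ph || h) (pt || tp) st
      | [] => repB_loop rest out h tp []
    else repB_loop rest (out ++ [t]) (h || opB t) true stack

def remove_extra_parenthesis_alt (sentence : List String) : List String :=
  repB_loop sentence [] false false []

-- ===== PRECONDITION & SPEC =====
-- paren delta of one token, and minimal prefix paren-balance of a token list
def pvDelta (t : String) : Int := if t = "(" then 1 else if t = ")" then -1 else 0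

def pvMp : List String → Int
  | [] => 0
  | x :: r => min 0 (pvDelta x + pvMp r)

-- Pre_ excludes exactly the inputs with a ')' token not preceded by a matching '(',
-- on which the Python A raises IndexError (content[-1] of an empty list).
def Pre_remove_extra_parenthesis (sentence : List String) : Prop := 0 ≤ pvMp sentence
instance (sentence : List String) : Decidable (Pre_remove_extra_parenthesis sentence) := by
  unfold Pre_remove_extra_parenthesis; infer_instance

def pvWitness_remove_extra_parenthesis : List String := ["(", "a", "&", "b", ")", "|", "c"]

def Spec_remove_extra_parenthesis (sentence : List String) (out : List String) : Prop := out = remove_extra_parenthesis_alt sentence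
instance (sentence : List String) (out : List String) : Decidable (Spec_remove_extra_parenthesis sentence out) := by unfold Spec_remove_extra_parenthesis; infer_instance

-- ===== CLAIM (what is proved, stated in full; the proofs are below) =====
def Claim_equal_remove_extra_parenthesis : Prop := ∀ (sentence : List String), Dom_remove_extra_parenthesis sentence → Pre_remove_extra_parenthesis sentence → Spec_remove_extra_parenthesis sentence (remove_extra_parenthesis sentence)

-- ===== LEMMAS AND PROOFS =====

-- total paren balance (proof-side helper)
def pvBal : List String → Int
  | [] => 0
  | x :: r => pvDelta x + pvBal r

theorem pvMp_nonpos (p : List String) : pvMp p ≤ 0 := by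
  cases p <;> simp [pvMp]

theorem pvBal_append (a b : List String) : pvBal (a ++ b) = pvBal a + pvBal b := by
  induction a with
  | nil => simp [pvBal]
  | cons x r ih => simp [pvBal, ih]; ring

theorem pvMp_append (a b : List String) : pvMp (a ++ b) = min (pvMp a) (pvBal a + pvMp b) := by
  induction a with
  | nil => simpa [pvMp, pvBal] using (min_eq_right (pvMp_nonpos b)).symm
  | cons x r ih =>
    simp [pvMp, pvBal, ih]
    omega

theorem containOp_append (a b : List String) :
    lnp_containOp (a ++ b) = (lnp_containOp a || lnp_containOp b) := by
  induction a with
  | nil => simp [lnp_containOp]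
  | cons x r ih =>
    by_cases h : is_propositional_op x = true <;> simp [lnp_containOp, h, ih]

theorem loop_append (a : List String) : ∀ (d : Int) (b : List String),
    lnp_loop d (a ++ b) = (lnp_loop d a || lnp_loop (d + pvBal a) b) := by
  induction a with
  | nil => intro d b; simp [lnp_loop, pvBal]
  | cons x r ih =>
    intro d b
    by_cases h1 : x = "("
    · simp only [List.cons_append, lnp_loop, ih, pvBal, pvDelta, if_pos h1]
      have : d + (1 + pvBal r) = d + 1 + pvBal r := by ring
      rw [this]
    · by_cases h2 : x = ")"
      · simp only [List.cons_append, lnp_loop, ih, pvBal, pvDelta,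
          if_neg h1, if_pos h2]
        have : d + (-1 + pvBal r) = d - 1 + pvBal r := by ring
        rw [this]
      · by_cases h3 : d = 0
        · simp [lnp_loop, h1, h2, h3]
        · simp only [List.cons_append, lnp_loop, ih, pvBal,
            pvDelta, if_neg h1, if_neg h2, if_neg h3]
          have : d + (0 + pvBal r) = d + pvBal r := by ring
          rw [this]

theorem loop_deep_false (p : List String) : ∀ d : Int, 1 ≤ d + pvMp p → lnp_loop d p = false := by
  induction p with
  | nil => intro d _; simp [lnp_loop]
  | cons x r ih =>
    intro d hd
    simp only [pvMp] at hd
    by_cases h1 : x = "("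
    · have hx : pvDelta x = 1 := by simp [pvDelta, h1]
      rw [hx] at hd
      simp only [lnp_loop, if_pos h1]
      exact ih (d + 1) (by omega)
    · by_cases h2 : x = ")"
      · have hx : pvDelta x = -1 := by simp [pvDelta, h2]
        rw [hx] at hd
        simp only [lnp_loop, if_neg h1, if_pos h2]
        exact ih (d - 1) (by omega)
      · have hx : pvDelta x = 0 := by simp [pvDelta, h1, h2]
        rw [hx] at hd
        have hd0 : ¬ d = 0 := by omega
        simp only [lnp_loop, if_neg h1, if_neg h2, if_neg hd0]
        exact ih d (by omega)

-- step lemmas unfolding one iteration of each loop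
theorem repA_open (rest ps brackets : List String) (cs : List (List String)) :
    rep_loop ("(" :: rest) ps brackets cs = rep_loop rest [] ("(" :: brackets) (ps :: cs) := by
  simp [rep_loop]

theorem repA_close (rest ps brackets c : List String) (cs : List (List String)) :
    rep_loop (")" :: rest) ps brackets (c :: cs) =
      rep_loop rest (c ++ (if literal_not_protected ps then "(" :: ps ++ [")"] else ps))
        (brackets.drop 1) cs := by
  simp [rep_loop]

theorem repA_tok (x : String) (rest ps brackets : List String) (cs : List (List String))
    (h1 : ¬ x = "(") (h2 : ¬ x = ")") :
    rep_loop (x :: rest) ps brackets cs = rep_loop rest (ps ++ [x]) brackets cs := by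
  simp [rep_loop, h1, h2]

theorem repB_open (rest out : List String) (h tp : Bool)
    (st : List (List String × Bool × Bool)) :
    repB_loop ("(" :: rest) out h tp st = repB_loop rest [] false false ((out, h, tp) :: st) := by
  simp [repB_loop]

theorem repB_close_wrap (rest out pout : List String) (ph pt : Bool)
    (st : List (List String × Bool × Bool)) :
    repB_loop (")" :: rest) out true true ((pout, ph, pt) :: st) =
      repB_loop rest (pout ++ "(" :: (out ++ [")"])) true pt st := by
  simp [repB_loop]

theorem repB_close_nowrap (rest out pout : List String) (h tp ph pt : Bool)
    (hw : (h && tp) = false) (st : List (List String × Bool × Bool)) :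
    repB_loop (")" :: rest) out h tp ((pout, ph, pt) :: st) =
      repB_loop rest (pout ++ out) (ph || h) (pt || tp) st := by
  simp [repB_loop, hw]

theorem repB_tok (x : String) (rest out : List String) (h tp : Bool)
    (st : List (List String × Bool × Bool)) (h1 : ¬ x = "(") (h2 : ¬ x = ")") :
    repB_loop (x :: rest) out h tp st = repB_loop rest (out ++ [x]) (h || opB x) true st := by
  simp [repB_loop, h1, h2]

-- the main invariant: A's loop state determines B's loop state
theorem main_inv : ∀ (rest ps : List String) (brackets : List String) (cs : List (List String)),
    0 ≤ (cs.length : Int) + pvMp rest →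
    pvBal ps = 0 → pvMp ps = 0 →
    (∀ c ∈ cs, pvBal c = 0 ∧ pvMp c = 0) →
    rep_loop rest ps brackets cs =
      repB_loop rest ps (lnp_containOp ps) (lnp_loop 0 ps)
        (cs.map (fun c => (c, lnp_containOp c, lnp_loop 0 c))) := by
  intro rest
  induction rest with
  | nil => intro ps brackets cs _ _ _ _; simp [rep_loop, repB_loop]
  | cons x rest ih =>
    intro ps brackets cs hpre hbal hmp hcs
    simp only [pvMp] at hpre
    have hmple := pvMp_nonpos rest
    by_cases h1 : x = "("
    · have hx : pvDelta x = 1 := by simp [pvDelta, h1]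
      rw [hx] at hpre
      subst h1
      rw [repA_open, repB_open]
      rw [ih [] ("(" :: brackets) (ps :: cs) (by simp; omega) (by simp [pvBal]) (by simp [pvMp])
        (by
          intro c hc
          rcases List.mem_cons.mp hc with hc | hc
          · subst hc; exact ⟨hbal, hmp⟩
          · exact hcs c hc)]
      simp [lnp_containOp, lnp_loop]
    · by_cases h2 : x = ")"
      · have hx : pvDelta x = -1 := by simp [pvDelta, h2]
        rw [hx] at hpre
        subst h2
        cases cs with
        | nil => exfalso; simp at hpre; omega
        | cons c cs' =>
          have hc := hcs c (by simp)
          have hcs' : ∀ d ∈ cs', pvBal d = 0 ∧ pvMp d = 0 := fun d hd => hcs d (by simp [hd])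
          have hpre' : 0 ≤ (cs'.length : Int) + pvMp rest := by
            simp at hpre; omega
          rw [List.map_cons, repA_close]
          cases hco : lnp_containOp ps with
          | false =>
            rw [repB_close_nowrap _ _ _ _ _ _ _ (by simp)]
            have hps' : literal_not_protected ps = false := by
              simp [literal_not_protected, hco]
            rw [hps', if_neg (by simp)]
            rw [ih (c ++ ps) (brackets.drop 1) cs' hpre'
              (by simp [pvBal_append, hc.1, hbal])
              (by rw [pvMp_append]; simp [hc.1, hc.2, hmp]) hcs']
            rw [containOp_append, loop_append, hc.1, hco]
            norm_num
          | true =>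
            cases htp : lnp_loop 0 ps with
            | false =>
              rw [repB_close_nowrap _ _ _ _ _ _ _ (by simp)]
              have hps' : literal_not_protected ps = false := by
                simp [literal_not_protected, hco, htp]
              rw [hps', if_neg (by simp)]
              rw [ih (c ++ ps) (brackets.drop 1) cs' hpre'
                (by simp [pvBal_append, hc.1, hbal])
                (by rw [pvMp_append]; simp [hc.1, hc.2, hmp]) hcs']
              rw [containOp_append, loop_append, hc.1]
              simp [hco, htp]
            | true =>
              rw [repB_close_wrap]
              have hps' : literal_not_protected ps = true := by
                simp [literal_not_protected, hco, htp]
              rw [hps', if_pos rfl]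
              simp only [List.cons_append]
              have hbal' : pvBal (c ++ "(" :: (ps ++ [")"])) = 0 := by
                simp [pvBal_append, pvBal, pvDelta, hc.1, hbal]
              have hmp' : pvMp (c ++ "(" :: (ps ++ [")"])) = 0 := by
                rw [pvMp_append]
                simp [pvMp, pvMp_append, pvDelta, hc.1, hc.2, hbal, hmp]
              rw [ih (c ++ "(" :: (ps ++ [")"])) (List.drop 1 brackets) cs' hpre' hbal' hmp' hcs']
              have hcoNew : lnp_containOp (c ++ "(" :: (ps ++ [")"])) = true := by
                rw [containOp_append]
                simp [lnp_containOp, is_propositional_op, PROPOSITIONAL_OPERATORS]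
              have htpNew : lnp_loop 0 (c ++ "(" :: (ps ++ [")"])) = lnp_loop 0 c := by
                rw [loop_append, hc.1]
                have hstep : lnp_loop (0 + 0) ("(" :: (ps ++ [")"])) = lnp_loop 1 (ps ++ [")"]) := by
                  norm_num [lnp_loop]
                rw [hstep, loop_append, loop_deep_false ps 1 (by rw [hmp]; norm_num), hbal]
                simp [lnp_loop]
              rw [hcoNew, htpNew]
      · have hx : pvDelta x = 0 := by simp [pvDelta, h1, h2]
        rw [hx] at hpre
        rw [repA_tok x rest ps brackets cs h1 h2, repB_tok x rest ps _ _ _ h1 h2]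
        rw [ih (ps ++ [x]) brackets cs (by omega)
          (by rw [pvBal_append]; simp [pvBal, hx, hbal])
          (by rw [pvMp_append, hbal]; simp [pvMp, hx, hmp])]
        · congr 1
          · rw [containOp_append]
            simp [lnp_containOp, is_propositional_op, opB, PROPOSITIONAL_OPERATORS]
          · rw [loop_append, hbal]
            simp [lnp_loop, h1, h2]
        · exact hcs

-- ===== VERDICT (by name: the statement is the Claim_ definition above) =====
theorem remove_extra_parenthesis_spec : Claim_equal_remove_extra_parenthesis := by
  intro sentence _ hpre
  unfold Spec_remove_extra_parenthesis remove_extra_parenthesis remove_extra_parenthesis_alt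
  have := main_inv sentence [] [] [] (by simpa [Pre_remove_extra_parenthesis] using hpre)
    (by simp [pvBal]) (by simp [pvMp]) (by intro c hc; simp at hc)
  simpa [lnp_containOp, lnp_loop] using this
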